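-- pv_equiv track=rewrite | github.com/SparshLakhani-hub/Ub_bot | scripts/ingest_ub_content.py | extract_title_and_body
-- ===== SOURCE A (Python) =====
-- from typing import Dict, List, Tuple
--
-- def extract_title_and_body(text: str) -> Tuple[str, str]:
--     """
--     Extract a title and body from a document.
--
--     For Markdown, uses the first '# heading' as title; otherwise, the first
--     non-empty line becomes the title.
--     """
--     lines = [line.strip() for line in text.splitlines()]
--     title = "Untitled"
--     body_lines: List[str] = []
--
--     found_title = False
--     for line in lines:
--         if not found_title:
--             if line.startswith("#"):
--                 title = line.lstrip("#").strip() or "Untitled"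
--                 found_title = True
--                 continue
--             if line:
--                 title = line
--                 found_title = True
--                 continue
--         body_lines.append(line)
--
--     body = "\n".join(body_lines).strip()
--     return title, body or text
-- ===== SOURCE B (Python) =====
-- def extract_title_and_body(text: str):
--     """Locate the first non-empty stripped line, then slice: head -> title, tail -> body."""
--     lines = [line.strip() for line in text.splitlines()]
--     rest = lines
--     while rest and not rest[0]:
--         rest = rest[1:]
--     if not rest:
--         return "Untitled", text
--     head, body_lines = rest[0], rest[1:]
--     if head.startswith("#"):
--         title = head.lstrip("#").strip() or "Untitled"
--     else:
--         title = head
--     body = "\n".join(body_lines).strip()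
--     return title, body or text
-- ===== Notes on version B (the rewrite author's own statement) =====
-- stated objective: simpler
-- what changed: Replaces A's flag-tracked accumulating fold (found_title state, body_lines list grown line by line) with a locate-then-slice decomposition: drop leading blank stripped lines, take the first remaining line as the title and the rest of the list as the body.
import Mathlib
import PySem

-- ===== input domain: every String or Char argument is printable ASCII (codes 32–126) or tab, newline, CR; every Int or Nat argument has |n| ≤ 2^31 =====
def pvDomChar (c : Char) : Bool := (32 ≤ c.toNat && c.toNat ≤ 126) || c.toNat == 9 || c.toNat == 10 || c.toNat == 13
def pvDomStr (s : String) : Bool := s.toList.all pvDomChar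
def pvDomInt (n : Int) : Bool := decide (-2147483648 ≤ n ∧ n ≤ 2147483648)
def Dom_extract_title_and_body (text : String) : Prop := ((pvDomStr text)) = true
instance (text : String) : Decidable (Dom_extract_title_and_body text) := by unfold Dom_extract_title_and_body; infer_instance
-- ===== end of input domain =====

-- B locates the first non-empty stripped line by dropping leading blanks and slices head/tail,
-- instead of A's flag-tracked accumulating fold; objective: simpler.

-- Hand port of s.lstrip("#") (strip set is the single char '#'): drop leading '#'s; exact on all input.
def pyLstripHash (s : String) : String :=
  String.ofList (s.toList.dropWhile (· == '#'))

-- ===== PORT A =====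
-- the body of A's for-loop (state = (title, body_lines, found_title))
def pvStepA (s : String × List String × Bool) (line : String) : String × List String × Bool :=
  if s.2.2 = false then
    if PySem.Str.startswith line "#" then
      (let t := PySem.Str.strip (pyLstripHash line)
       ((if t = "" then "Untitled" else t), s.2.1, true))
    else if line ≠ "" then (line, s.2.1, true)
    else (s.1, s.2.1 ++ [line], s.2.2)
  else (s.1, s.2.1 ++ [line], s.2.2)

def extract_title_and_body (text : String) : String × String :=
  let lines := (PySem.Str.splitlines text).map PySem.Str.strip
  let st := lines.foldl pvStepA ("Untitled", ([] : List String), false)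
  let body := PySem.Str.strip (PySem.Str.join "\n" st.2.1)
  (st.1, if body = "" then text else body)

-- ===== PORT B =====
def extract_title_and_body_alt (text : String) : String × String :=
  let lines := (PySem.Str.splitlines text).map PySem.Str.strip
  let rest := lines.dropWhile (fun l => l == "")  -- while rest and not rest[0]: rest = rest[1:]
  match rest with
  | [] => ("Untitled", text)
  | head :: body_lines =>
    let title := if PySem.Str.startswith head "#" then
        (let t := PySem.Str.strip (pyLstripHash head)
         if t = "" then "Untitled" else t)
      else head
    let body := PySem.Str.strip (PySem.Str.join "\n" body_lines)
    (title, if body = "" then text else body)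

-- ===== PRECONDITION & SPEC =====
def Spec_extract_title_and_body (text : String) (out : String × String) : Prop := out = extract_title_and_body_alt text
instance (text : String) (out : String × String) : Decidable (Spec_extract_title_and_body text out) := by unfold Spec_extract_title_and_body; infer_instance

-- ===== CLAIM (what is proved, stated in full; the proofs are below) =====
def Claim_equal_extract_title_and_body : Prop := ∀ (text : String), Dom_extract_title_and_body text → Spec_extract_title_and_body text (extract_title_and_body text)

-- ===== LEMMAS AND PROOFS =====

-- the title A assigns at the first non-empty line
def pvTitleOf (h : String) : String :=
  if PySem.Str.startswith h "#" then
    (let t := PySem.Str.strip (pyLstripHash h)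
     if t = "" then "Untitled" else t)
  else h

-- Once found_title is set, A's loop only appends to body_lines.
theorem foldA_found (ls : List String) (t : String) (b : List String) :
    ls.foldl pvStepA (t, b, true) = (t, b ++ ls, true) := by
  induction ls generalizing b with
  | nil => simp
  | cons l ls ih => simpa [pvStepA] using ih (b ++ [l])

-- Before found_title is set, A's loop skips blanks to the first non-empty line:
-- those blanks land in body_lines, the head becomes the title, the tail is appended.
theorem foldA_notfound (ls : List String) (t : String) (b : List String) :
    ls.foldl pvStepA (t, b, false) =
      match ls.dropWhile (fun l => l == "") with
      | [] => (t, b ++ ls, false)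
      | h :: rest => (pvTitleOf h, b ++ ls.takeWhile (fun l => l == "") ++ rest, true) := by
  induction ls generalizing b with
  | nil => simp
  | cons l ls ih =>
    by_cases hl : l = ""
    · subst hl
      have h1 : pvStepA (t, b, false) "" = (t, b ++ [""], false) := rfl
      simp only [List.foldl_cons, h1, ih (b ++ [""]), List.dropWhile_cons, List.takeWhile_cons]
      cases ls.dropWhile (fun l => l == "") <;> simp
    · have h1 : pvStepA (t, b, false) l = (pvTitleOf l, b, true) := by
        by_cases hsw : PySem.Chars.startswith l.toList ['#'] = true
        · simp [pvStepA, pvTitleOf, hsw]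
        · simp [pvStepA, pvTitleOf, hsw, hl]
      have hpl : (l == "") = false := by simpa using hl
      simp only [List.foldl_cons, h1, foldA_found, List.dropWhile_cons, List.takeWhile_cons, hpl]
      simp

theorem strip_cons_newline (cs : List Char) : PySem.Chars.strip ('\n' :: cs) = PySem.Chars.strip cs := by
  simp [PySem.Chars.strip, PySem.Chars.lstrip, List.dropWhile, PySem.Chars.isspace]

theorem strip_join_blank_cons (l : List (List Char)) :
    PySem.Chars.strip (PySem.Chars.join ['\n'] ([] :: l)) = PySem.Chars.strip (PySem.Chars.join ['\n'] l) := by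
  cases l with
  | nil => rw [PySem.Chars.join_singleton, PySem.Chars.join_nil]
  | cons y l => rw [PySem.Chars.join_cons_cons]; simpa using strip_cons_newline (PySem.Chars.join ['\n'] (y :: l))

-- Leading all-blank pieces do not change the stripped "\n"-join.
theorem strip_join_blanks (bs rest : List (List Char)) (h : ∀ x ∈ bs, x = []) :
    PySem.Chars.strip (PySem.Chars.join ['\n'] (bs ++ rest)) = PySem.Chars.strip (PySem.Chars.join ['\n'] rest) := by
  induction bs with
  | nil => rfl
  | cons x bs ih =>
    have hx : x = [] := h x (by simp)
    subst hx
    rw [List.cons_append, strip_join_blank_cons]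
    exact ih (fun y hy => h y (by simp [hy]))

theorem str_strip_join_blanks (bs rest : List String) (h : ∀ x ∈ bs, x = "") :
    PySem.Str.strip (PySem.Str.join "\n" (bs ++ rest)) = PySem.Str.strip (PySem.Str.join "\n" rest) := by
  simp only [PySem.Str.strip, PySem.Str.join, List.map_append, String.toList_ofList,
    show ("\n" : String).toList = ['\n'] from rfl]
  congr 1
  apply strip_join_blanks
  intro x hx
  simp only [List.mem_map] at hx
  obtain ⟨y, hy, rfl⟩ := hx
  rw [h y hy]; rfl

theorem main_eq (text : String) : extract_title_and_body text = extract_title_and_body_alt text := by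
  unfold extract_title_and_body extract_title_and_body_alt
  dsimp only
  set lines := (PySem.Str.splitlines text).map PySem.Str.strip with hlines
  rw [foldA_notfound]
  cases hd : lines.dropWhile (fun l => l == "") with
  | nil =>
    have hall : ∀ x ∈ lines, x = "" := by
      intro x hx
      have := List.dropWhile_eq_nil_iff.mp hd x hx
      simpa using this
    have hb : PySem.Str.strip (PySem.Str.join "\n" lines) = "" := by
      have := str_strip_join_blanks lines [] hall
      simpa using this
    simp [hb]
  | cons h rest =>
    have htk : ∀ x ∈ lines.takeWhile (fun l => l == ""), x = "" := by
      intro x hx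
      have := List.mem_takeWhile_imp hx
      simpa using this
    have hb := str_strip_join_blanks (lines.takeWhile (fun l => l == "")) rest htk
    simp only [List.nil_append]
    rw [hb]
    rfl

-- ===== VERDICT (by name: the statement is the Claim_ definition above) =====
theorem extract_title_and_body_spec : Claim_equal_extract_title_and_body := by
  intro text _
  exact main_eq text
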